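-- pv_equiv track=rewrite | github.com/kegare825/Freq_kanji | src/processing/format.py | extract_readings
-- ===== SOURCE A (Python) =====
-- def extract_readings(lines):
--     """Extrae las lecturas on y kun del kanji."""
--     on, kun = None, None
--     for i, ln in enumerate(lines):
--         if "Lecturas chinas" in ln:
--             # siguiente línea no vacía
--             for x in lines[i+1:]:
--                 if x.strip():
--                     on = x.strip()
--                     break
--         if "Lecturas japonesas" in ln:
--             for x in lines[i+1:]:
--                 if x.strip():
--                     kun = x.strip()
--                     break
--     return on, kun
-- ===== SOURCE B (Python) =====
-- def extract_readings(lines):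
--     """Extrae las lecturas on y kun del kanji (single pass with pending flags)."""
--     on, kun = None, None
--     expect_on, expect_kun = False, False
--     for ln in lines:
--         s = ln.strip()
--         if s and expect_on:
--             on, expect_on = s, False
--         if s and expect_kun:
--             kun, expect_kun = s, False
--         if "Lecturas chinas" in ln:
--             expect_on = True
--         if "Lecturas japonesas" in ln:
--             expect_kun = True
--     return on, kun
-- ===== Notes on version B (the rewrite author's own statement) =====
-- stated objective: alternative
-- what changed: Replaced the per-marker rescan of lines[i+1:] (nested loops) by one linear pass keeping two pending-flag booleans that assign the next non-empty stripped line; it trades the forward rescans for carried state.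
import Mathlib
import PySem

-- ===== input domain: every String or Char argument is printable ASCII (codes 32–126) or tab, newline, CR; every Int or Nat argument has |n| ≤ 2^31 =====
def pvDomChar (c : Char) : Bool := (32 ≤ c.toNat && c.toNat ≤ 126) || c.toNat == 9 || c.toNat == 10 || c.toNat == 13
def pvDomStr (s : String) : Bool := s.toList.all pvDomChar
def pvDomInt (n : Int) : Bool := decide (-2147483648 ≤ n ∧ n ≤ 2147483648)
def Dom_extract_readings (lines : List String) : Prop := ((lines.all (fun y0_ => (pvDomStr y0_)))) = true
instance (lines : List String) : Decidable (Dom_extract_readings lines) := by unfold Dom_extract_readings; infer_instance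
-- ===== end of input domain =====

-- B replaces A's nested rescans of lines[i+1:] with one linear pass carrying two pending flags (objective: alternative decomposition).

-- ===== PORT A =====
-- inner `for x in lines[i+1:]: if x.strip(): … ; break` — first non-empty stripped line
def pvFirstNE : List String → Option String
  | [] => none
  | x :: rest =>
      if PySem.Str.strip x ≠ "" then some (PySem.Str.strip x) else pvFirstNE rest

-- the enumerate loop; at index i the remaining suffix `rest` is exactly lines[i+1:]
def pvALoop : List String → Option String × Option String → Option String × Option String
  | [], st => st
  | ln :: rest, (on, kun) =>
      let on := if PySem.Str.isIn "Lecturas chinas" ln then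
                  match pvFirstNE rest with
                  | some v => some v
                  | none => on
                else on
      let kun := if PySem.Str.isIn "Lecturas japonesas" ln then
                  match pvFirstNE rest with
                  | some v => some v
                  | none => kun
                else kun
      pvALoop rest (on, kun)

def extract_readings (lines : List String) : Option String × Option String :=
  pvALoop lines (none, none)

-- ===== PORT B =====
def pvBLoop : List String → Option String → Option String → Bool → Bool → Option String × Option String
  | [], on, kun, _, _ => (on, kun)
  | ln :: rest, on, kun, eo, ek =>
      let s := PySem.Str.strip ln
      let on' := if s ≠ "" ∧ eo then some s else on
      let eo' := if s ≠ "" ∧ eo then false else eo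
      let kun' := if s ≠ "" ∧ ek then some s else kun
      let ek' := if s ≠ "" ∧ ek then false else ek
      let eo'' := if PySem.Str.isIn "Lecturas chinas" ln then true else eo'
      let ek'' := if PySem.Str.isIn "Lecturas japonesas" ln then true else ek'
      pvBLoop rest on' kun' eo'' ek''

def extract_readings_alt (lines : List String) : Option String × Option String :=
  pvBLoop lines none none false false

-- ===== PRECONDITION & SPEC =====
def Spec_extract_readings (lines : List String) (out : Option String × Option String) : Prop := out = extract_readings_alt lines
instance (lines : List String) (out : Option String × Option String) : Decidable (Spec_extract_readings lines out) := by unfold Spec_extract_readings; infer_instance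

-- ===== CLAIM (what is proved, stated in full; the proofs are below) =====
def Claim_equal_extract_readings : Prop := ∀ (lines : List String), Dom_extract_readings lines → Spec_extract_readings lines (extract_readings lines)

-- ===== LEMMAS AND PROOFS =====

-- value a pending flag `e` stands for in A's terms: the first non-empty line of the remaining suffix, else the current value
def pvPend (rest : List String) (cur : Option String) (e : Bool) : Option String :=
  if e then
    match pvFirstNE rest with
    | some v => some v
    | none => cur
  else cur

theorem pvBLoop_eq_pvALoop (rest : List String) :
    ∀ (on kun : Option String) (eo ek : Bool),
      pvBLoop rest on kun eo ek = pvALoop rest (pvPend rest on eo, pvPend rest kun ek) := by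
  induction rest with
  | nil =>
      intro on kun eo ek
      cases eo <;> cases ek <;> simp [pvBLoop, pvALoop, pvPend, pvFirstNE]
  | cons ln rest ih =>
      intro on kun eo ek
      simp only [pvBLoop, pvALoop, ih]
      by_cases hs : PySem.Str.strip ln ≠ "" <;>
        cases eo <;> cases ek <;>
        by_cases ho : PySem.Str.isIn "Lecturas chinas" ln <;>
        by_cases hk : PySem.Str.isIn "Lecturas japonesas" ln <;>
        simp [pvPend, pvFirstNE, hs, ho, hk] <;> try (
        cases h : pvFirstNE rest <;> simp [h])

-- ===== VERDICT (by name: the statement is the Claim_ definition above) =====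
theorem extract_readings_spec : Claim_equal_extract_readings := by
  intro lines _
  show extract_readings lines = extract_readings_alt lines
  rw [extract_readings, extract_readings_alt, pvBLoop_eq_pvALoop]
  rfl
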